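-- pv_equiv track=rewrite | github.com/qmlcode/qml | qml/helpers/helpers.py | get_BoB_groups
-- ===== SOURCE A (Python) =====
-- def get_BoB_groups(asize, sort=True):
--     """
--     Get starting and ending indices of bags in Bags of Bonds representation.
--
--     :param asize: Atomtypes and their maximal numbers in the representation
--     :type asize: dictionary
--     :param sort: Whether to sort indices as usually automatically done
--     :type sort: bool
--     """
--     if sort:
--         asize = {k: asize[k] for k in sorted(asize, key=asize.get)}
--     n = 0
--     low_indices = {}
--     high_indices = {}
--     for i, (key1, value1) in enumerate(asize.items()):
--         for j, (key2, value2) in enumerate(asize.items()):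
--             if j == i:   # Comparing same-atoms bonds like C-C
--                 new_key = key1 + key2
--                 low_indices[new_key] = n
--                 n += int(value1 * (value1+1) / 2)
--                 high_indices[new_key] = n
--             elif j >= i:   # Comparing different-atoms bonds like C-H
--                 new_key = key1 + key2
--                 low_indices[new_key] = n
--                 n += int(value1 * value2)
--                 high_indices[new_key] = n
--     return low_indices, high_indices
-- ===== SOURCE B (Python) =====
-- def _bags(items):
--     # ordered (bag-key, bag-size) table, built by a suffix loop
--     pairs, tail = [], list(items)
--     while tail:
--         (k1, v1) = tail.pop(0)
--         pairs.append((k1 + k1, int(v1 * (v1 + 1) / 2)))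
--         pairs.extend((k1 + k2, int(v1 * v2)) for (k2, v2) in tail)
--     return pairs
--
--
-- def get_BoB_groups(asize, sort=True):
--     if sort:
--         items = [(k, asize[k]) for k in sorted(asize, key=asize.get)]
--     else:
--         items = list(asize.items())
--     low_indices, high_indices, n = {}, {}, 0
--     for key, size in _bags(items):
--         low_indices[key] = n
--         n += size
--         high_indices[key] = n
--     return low_indices, high_indices
-- ===== Notes on version B (the rewrite author's own statement) =====
-- stated objective: alternative
-- what changed: A's single interleaved pass of nested full k-by-k enumerate scans with j==i / j>=i guards is replaced by two passes: a suffix loop (tail.pop(0)) that builds the ordered (bag-key, bag-size) table visiting only i<=j pairs with no index comparisons, followed by a separate prefix-sum pass that fills both index dicts.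
import Mathlib
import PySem

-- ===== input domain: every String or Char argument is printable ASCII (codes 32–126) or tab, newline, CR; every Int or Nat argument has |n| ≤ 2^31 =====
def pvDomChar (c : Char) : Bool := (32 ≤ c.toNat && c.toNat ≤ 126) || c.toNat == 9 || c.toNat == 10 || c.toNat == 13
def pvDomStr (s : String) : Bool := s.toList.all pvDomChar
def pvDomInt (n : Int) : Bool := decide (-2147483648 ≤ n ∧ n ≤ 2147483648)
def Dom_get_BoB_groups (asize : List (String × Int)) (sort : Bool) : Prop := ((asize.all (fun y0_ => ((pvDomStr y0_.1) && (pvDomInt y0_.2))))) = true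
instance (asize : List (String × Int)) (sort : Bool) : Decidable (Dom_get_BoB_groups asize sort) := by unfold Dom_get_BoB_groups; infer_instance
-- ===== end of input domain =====

-- B replaces A's guarded full k×k double scan by a (key,size) table built from list suffixes plus
-- a separate prefix-sum pass (alternative decomposition, same asymptotic cost).

-- int(m / 2) for 0 ≤ m: Python's true division rounds the exact quotient to the nearest double
-- (ties to even, 53 significant bits); halving is exact, so this is round-to-53-bits then /2.
-- Hand-ported (PySem has no float primitive); exact for 0 ≤ m < 2^117, which covers the domain.
def pvRound53 (m : Nat) : Nat :=
  if m < 2 ^ 53 then m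
  else
    let e := (List.range 64).foldl (fun e _ => if m < 2 ^ (53 + e) then e else e + 1) 0
    let q := m / 2 ^ e
    let r := m % 2 ^ e
    let h := 2 ^ (e - 1)
    if h < r || (r == h && q % 2 == 1) then (q + 1) * 2 ^ e else q * 2 ^ e

-- int(v * (v + 1) / 2); v*(v+1) ≥ 0 so truncation is exact division after rounding
def pvTruncHalfProd (v : Int) : Int := ((pvRound53 (v * (v + 1)).toNat : Nat) : Int) / 2

-- ===== PORT A =====
def get_BoB_groups (asize : List (String × Int)) (sort : Bool) : (List (String × Int)) × (List (String × Int)) :=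
  let d0 : PySem.Dict String Int := PySem.Dict.ofList asize   -- the dict-typed parameter
  -- if sort: asize = {k: asize[k] for k in sorted(asize, key=asize.get)}
  let d : PySem.Dict String Int :=
    if sort then
      PySem.Dict.ofList ((PySem.List.sorted d0.keys (fun k => d0.getD k 0) false).map (fun k => (k, d0.getD k 0)))
    else d0
  -- n = 0; low = {}; high = {}; nested enumerate loops
  let res :=
    (PySem.List.enumerate d.items 0).foldl
      (fun st p =>
        (PySem.List.enumerate d.items 0).foldl
          (fun st q =>
            if q.1 == p.1 then
              (st.1 + pvTruncHalfProd p.2.2,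
               st.2.1.insert (p.2.1 ++ q.2.1) st.1,
               st.2.2.insert (p.2.1 ++ q.2.1) (st.1 + pvTruncHalfProd p.2.2))
            else if q.1 ≥ p.1 then
              (st.1 + p.2.2 * q.2.2,
               st.2.1.insert (p.2.1 ++ q.2.1) st.1,
               st.2.2.insert (p.2.1 ++ q.2.1) (st.1 + p.2.2 * q.2.2))
            else st)
          st)
      ((0 : Int), (PySem.Dict.empty : PySem.Dict String Int), (PySem.Dict.empty : PySem.Dict String Int))
  (res.2.1.items, res.2.2.items)

-- ===== PORT B =====
-- _bags: while tail: head = tail.pop(0); append diagonal pair; extend with off-diagonal pairs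
def pvBags (acc : List (String × Int)) : List (String × Int) → List (String × Int)
  | [] => acc
  | (k1, v1) :: tail =>
      pvBags (acc ++ (k1 ++ k1, pvTruncHalfProd v1) :: tail.map (fun q => (k1 ++ q.1, v1 * q.2))) tail

def get_BoB_groups_alt (asize : List (String × Int)) (sort : Bool) : (List (String × Int)) × (List (String × Int)) :=
  let d : PySem.Dict String Int := PySem.Dict.ofList asize   -- the dict-typed parameter
  let items : List (String × Int) :=
    if sort then (PySem.List.sorted d.keys (fun k => d.getD k 0) false).map (fun k => (k, d.getD k 0))
    else d.items
  -- prefix-sum pass over the (key, size) table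
  let res :=
    (pvBags [] items).foldl
      (fun st q => (st.1 + q.2, st.2.1.insert q.1 st.1, st.2.2.insert q.1 (st.1 + q.2)))
      ((0 : Int), (PySem.Dict.empty : PySem.Dict String Int), (PySem.Dict.empty : PySem.Dict String Int))
  (res.2.1.items, res.2.2.items)

-- ===== PRECONDITION & SPEC =====
def Spec_get_BoB_groups (asize : List (String × Int)) (sort : Bool) (out : (List (String × Int)) × (List (String × Int))) : Prop := out = get_BoB_groups_alt asize sort
instance (asize : List (String × Int)) (sort : Bool) (out : (List (String × Int)) × (List (String × Int))) : Decidable (Spec_get_BoB_groups asize sort out) := by unfold Spec_get_BoB_groups; infer_instance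

-- ===== CLAIM (what is proved, stated in full; the proofs are below) =====
def Claim_equal_get_BoB_groups : Prop := ∀ (asize : List (String × Int)) (sort : Bool), Dom_get_BoB_groups asize sort → Spec_get_BoB_groups asize sort (get_BoB_groups asize sort)

-- ===== LEMMAS AND PROOFS =====

-- proof vocabulary: B's uniform prefix-sum step, A's guarded inner body, the pure pair table
def pvSt : Type := Int × PySem.Dict String Int × PySem.Dict String Int

def pvStep (st : pvSt) (q : String × Int) : pvSt :=
  (st.1 + q.2, st.2.1.insert q.1 st.1, st.2.2.insert q.1 (st.1 + q.2))

def pvInner (key1 : String) (value1 : Int) (i : Int) (st : pvSt) (q : Int × (String × Int)) : pvSt :=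
  if q.1 == i then pvStep st (key1 ++ q.2.1, pvTruncHalfProd value1)
  else if q.1 ≥ i then pvStep st (key1 ++ q.2.1, value1 * q.2.2)
  else st

def pvRows : List (String × Int) → List (String × Int)
  | [] => []
  | (k1, v1) :: t => (k1 ++ k1, pvTruncHalfProd v1) :: (t.map (fun q => (k1 ++ q.1, v1 * q.2)) ++ pvRows t)

lemma pvBags_eq (t : List (String × Int)) : ∀ acc, pvBags acc t = acc ++ pvRows t := by
  induction t with
  | nil => intro acc; simp [pvBags, pvRows]
  | cons hd tl ih =>
      intro acc
      obtain ⟨k1, v1⟩ := hd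
      simp [pvBags, pvRows, ih]

-- elements with index below i are skipped by A's inner loop
lemma pv_skip (key1 : String) (value1 : Int) (i : Int) (ts : List (String × Int)) :
    ∀ (s : Int) (st : pvSt), s + ts.length ≤ i →
      (PySem.List.enumerate ts s).foldl (pvInner key1 value1 i) st = st := by
  induction ts with
  | nil => intro s st _; simp [PySem.List.enumerate_nil]
  | cons hd tl ih =>
      intro s st hle
      simp only [PySem.List.enumerate_cons, List.foldl_cons, List.length_cons] at *
      have h1 : (s == i) = false := by simp; omega
      have h2 : ¬ (s ≥ i) := by omega
      rw [show pvInner key1 value1 i st (s, hd) = st by simp [pvInner, h1, h2]]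
      exact ih (s + 1) st (by push_cast at hle ⊢; omega)

-- elements with index above i all take the off-diagonal branch
lemma pv_off (key1 : String) (value1 : Int) (i : Int) (ts : List (String × Int)) :
    ∀ (s : Int) (st : pvSt), i < s →
      (PySem.List.enumerate ts s).foldl (pvInner key1 value1 i) st
        = ts.foldl (fun st q => pvStep st (key1 ++ q.1, value1 * q.2)) st := by
  induction ts with
  | nil => intro s st _; simp [PySem.List.enumerate_nil]
  | cons hd tl ih =>
      intro s st hlt
      simp only [PySem.List.enumerate_cons, List.foldl_cons]
      have h1 : (s == i) = false := by simp; omega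
      have h2 : s ≥ i := le_of_lt hlt
      rw [show pvInner key1 value1 i st (s, hd) = pvStep st (key1 ++ hd.1, value1 * hd.2) by
            simp [pvInner, h1, h2]]
      exact ih (s + 1) _ (by omega)

-- A's inner loop over the suffix starting at index i: diagonal step, then off-diagonal steps
lemma pv_inner_at (key1 : String) (value1 : Int) (y : String × Int) (ys : List (String × Int))
    (s : Int) (st : pvSt) :
    (PySem.List.enumerate (y :: ys) s).foldl (pvInner key1 value1 s) st
      = ys.foldl (fun st q => pvStep st (key1 ++ q.1, value1 * q.2))
          (pvStep st (key1 ++ y.1, pvTruncHalfProd value1)) := by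
  simp only [PySem.List.enumerate_cons, List.foldl_cons]
  rw [show pvInner key1 value1 s st (s, y) = pvStep st (key1 ++ y.1, pvTruncHalfProd value1) by
        simp [pvInner]]
  exact pv_off key1 value1 s ys (s + 1) _ (by omega)

-- A's whole nested loop, for the suffix ys of items that still has to be processed
lemma pv_outer (ys : List (String × Int)) :
    ∀ (pre items : List (String × Int)) (st : pvSt), items = pre ++ ys →
      (PySem.List.enumerate ys (pre.length : Int)).foldl
          (fun st p => (PySem.List.enumerate items 0).foldl (pvInner p.2.1 p.2.2 p.1) st) st
        = (pvRows ys).foldl pvStep st := by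
  induction ys with
  | nil => intro pre items st _; simp [PySem.List.enumerate_nil, pvRows]
  | cons y ys ih =>
      intro pre items st hitems
      obtain ⟨k1, v1⟩ := y
      simp only [PySem.List.enumerate_cons, List.foldl_cons]
      have hfirst :
          (PySem.List.enumerate items 0).foldl (pvInner k1 v1 (pre.length : Int)) st
            = ys.foldl (fun st q => pvStep st (k1 ++ q.1, v1 * q.2))
                (pvStep st (k1 ++ k1, pvTruncHalfProd v1)) := by
        rw [hitems, PySem.List.enumerate_append, List.foldl_append,
            pv_skip k1 v1 (pre.length : Int) pre 0 st (by simp),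
            show ((0 : Int) + pre.length) = (pre.length : Int) by ring]
        exact pv_inner_at k1 v1 (k1, v1) ys (pre.length : Int) st
      rw [hfirst]
      have hr : List.foldl pvStep st (pvRows ((k1, v1) :: ys))
          = List.foldl pvStep
              (List.foldl (fun st q => pvStep st (k1 ++ q.1, v1 * q.2))
                (pvStep st (k1 ++ k1, pvTruncHalfProd v1)) ys)
              (pvRows ys) := by
        simp [pvRows, List.foldl_append, List.foldl_map]
      rw [hr]
      have hlen : ((pre ++ [((k1 : String), (v1 : Int))]).length : Int) = (pre.length : Int) + 1 := by
        simp
      rw [← hlen]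
      exact ih (pre ++ [(k1, v1)]) items _ (by simp [hitems])

-- a dict built from pairs with distinct keys lists exactly those pairs
lemma pv_items_ofList (L : List (String × Int)) (h : (L.map Prod.fst).Nodup) :
    (PySem.Dict.ofList L).items = L := by
  have := PySem.Dict.items_foldl_insert_fresh (l := L) (k := Prod.fst) (v := Prod.snd)
    (d := PySem.Dict.empty) (by simp) h
  simpa [PySem.Dict.ofList] using this

-- the item lists the two ports loop over are equal
lemma pv_items_eq (asize : List (String × Int)) (sort : Bool) :
    (if sort then
        PySem.Dict.ofList (((PySem.List.sorted (PySem.Dict.ofList asize).keys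
            (fun k => (PySem.Dict.ofList asize).getD k 0) false)).map
            (fun k => (k, (PySem.Dict.ofList asize).getD k 0)))
      else PySem.Dict.ofList asize).items
    = (if sort then
        ((PySem.List.sorted (PySem.Dict.ofList asize).keys
            (fun k => (PySem.Dict.ofList asize).getD k 0) false)).map
            (fun k => (k, (PySem.Dict.ofList asize).getD k 0))
      else (PySem.Dict.ofList asize).items) := by
  cases sort
  · rfl
  · simp only [if_pos]
    apply pv_items_ofList
    have hperm : (PySem.List.sorted (PySem.Dict.ofList asize).keys
        (fun k => (PySem.Dict.ofList asize).getD k 0) false).Perm (PySem.Dict.ofList asize).keys :=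
      PySem.List.sorted_perm _ _ _
    have hnd : (PySem.List.sorted (PySem.Dict.ofList asize).keys
        (fun k => (PySem.Dict.ofList asize).getD k 0) false).Nodup :=
      hperm.nodup_iff.mpr (PySem.Dict.nodup_keys_ofList asize)
    simpa [List.map_map, Function.comp_def] using hnd

-- ===== VERDICT (by name: the statement is the Claim_ definition above) =====
theorem get_BoB_groups_spec : Claim_equal_get_BoB_groups := by
  unfold Claim_equal_get_BoB_groups
  intro asize sort _
  show get_BoB_groups asize sort = get_BoB_groups_alt asize sort
  show
    (let items :=
        (if sort then
          PySem.Dict.ofList (((PySem.List.sorted (PySem.Dict.ofList asize).keys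
              (fun k => (PySem.Dict.ofList asize).getD k 0) false)).map
              (fun k => (k, (PySem.Dict.ofList asize).getD k 0)))
        else PySem.Dict.ofList asize).items
     let res := (PySem.List.enumerate items 0).foldl
        (fun st p => (PySem.List.enumerate items 0).foldl (pvInner p.2.1 p.2.2 p.1) st)
        ((0 : Int), (PySem.Dict.empty : PySem.Dict String Int), (PySem.Dict.empty : PySem.Dict String Int))
     (res.2.1.items, res.2.2.items))
    =
    (let items :=
        (if sort then
          ((PySem.List.sorted (PySem.Dict.ofList asize).keys
              (fun k => (PySem.Dict.ofList asize).getD k 0) false)).map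
              (fun k => (k, (PySem.Dict.ofList asize).getD k 0))
        else (PySem.Dict.ofList asize).items)
     let res := (pvBags [] items).foldl pvStep
        ((0 : Int), (PySem.Dict.empty : PySem.Dict String Int), (PySem.Dict.empty : PySem.Dict String Int))
     (res.2.1.items, res.2.2.items))
  simp only [pv_items_eq asize sort]
  generalize (if sort then
      ((PySem.List.sorted (PySem.Dict.ofList asize).keys
          (fun k => (PySem.Dict.ofList asize).getD k 0) false)).map
          (fun k => (k, (PySem.Dict.ofList asize).getD k 0))
    else (PySem.Dict.ofList asize).items) = items
  rw [pvBags_eq, List.nil_append]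
  have h := pv_outer items [] items
      ((0 : Int), (PySem.Dict.empty : PySem.Dict String Int), (PySem.Dict.empty : PySem.Dict String Int)) rfl
  simp only [List.length_nil, Nat.cast_zero] at h
  rw [h]
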